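-- pv_equiv track=rewrite | github.com/981377660LMT/algorithm-study | 22_专题/计算偏移量/6275. 使数组中所有元素相等的最小操作数 II-按模分组.py | minOperations2
-- ===== SOURCE A (Python) =====
-- from typing import List
-- from collections import defaultdict, Counter
--
-- def minOperations2(nums1: List[int], nums2: List[int], k: int) -> int:
--     """不看下标,counter相等,需要按mod k分组后排序,每个组内对应相等"""
--     if sum(nums1) != sum(nums2):
--         return -1
--     if k == 0:
--         return 0 if Counter(nums1) == Counter(nums2) else -1
--
--     n = len(nums1)
--     g1, g2 = defaultdict(list), defaultdict(list)
--     for i in range(n):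
--         g1[nums1[i] % k].append(nums1[i])
--         g2[nums2[i] % k].append(nums2[i])
--     for g in g1.values():
--         g.sort()
--     for g in g2.values():
--         g.sort()
--
--     res = 0
--     for mod in range(k):
--         if len(g1[mod]) != len(g2[mod]):
--             return -1
--         for a, b in zip(g1[mod], g2[mod]):
--             res += abs(a - b) // k
--     return res // 2
-- ===== SOURCE B (Python) =====
-- from collections import Counter
--
--
-- def minOperations2(nums1, nums2, k):
--     if sum(nums1) != sum(nums2):
--         return -1
--     if k == 0:
--         return 0 if sorted(nums1) == sorted(nums2) else -1
--     if Counter(x % k for x in nums1) != Counter(y % k for y in nums2):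
--         return -1
--     # prefix-balance sweep: no pairing of elements, no per-group loops
--     events = sorted([(x % k, x, 1) for x in nums1] + [(y % k, y, -1) for y in nums2])
--     total = bal = pv = 0
--     for _, v, t in events:
--         total += abs(bal) * (v - pv)
--         bal += t
--         pv = v
--     return total // k // 2
-- ===== Notes on version B (the rewrite author's own statement) =====
-- stated objective: alternative
-- what changed: B never pairs elements at all: it checks feasibility by comparing residue Counters, then computes the cost with a prefix-balance sweep over the single merged sorted list of (+1/-1)-tagged events from both arrays, summing |balance|*gap, instead of A's per-residue dict-of-lists grouping with sorted zip pairing inside each group.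
-- intended difference: When k < 0, the sums are equal and the lists are not permutations of each other, A's 'for mod in range(k)' loop never runs so A returns the leftover 0 (claiming success with zero operations), while B returns a negative value or -1 from its own computation, signalling that no sequence of moves of size k < 0 equalises the arrays. — e.g. on minOperations2([0, 2], [1, 1], -1): A returns 0, B returns -1
-- outside the precondition, e.g. on minOperations2([4], [3, 1], 1): A returns 0, B returns -1; on minOperations2([1, 2], [3], 1): A raises IndexError, B returns -1
import Mathlib
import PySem

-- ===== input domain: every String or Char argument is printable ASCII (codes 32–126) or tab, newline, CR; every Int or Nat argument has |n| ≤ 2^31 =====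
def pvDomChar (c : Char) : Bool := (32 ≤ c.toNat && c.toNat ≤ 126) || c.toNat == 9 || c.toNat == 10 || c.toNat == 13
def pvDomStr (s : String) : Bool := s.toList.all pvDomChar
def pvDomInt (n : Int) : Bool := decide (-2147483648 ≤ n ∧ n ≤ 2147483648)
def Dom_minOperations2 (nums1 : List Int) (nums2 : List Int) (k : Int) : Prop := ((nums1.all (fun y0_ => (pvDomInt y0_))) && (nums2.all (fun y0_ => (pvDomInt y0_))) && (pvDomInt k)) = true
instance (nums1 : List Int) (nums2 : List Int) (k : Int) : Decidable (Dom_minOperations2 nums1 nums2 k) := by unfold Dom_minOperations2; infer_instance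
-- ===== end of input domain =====

-- B replaces A's per-residue dict-of-lists grouping with sorted zip pairing inside each group
-- by a residue-Counter feasibility check plus a prefix-balance sweep over one merged sorted
-- list of (+1/-1)-tagged events from both arrays (objective: alternative — no pairing at all).

-- ===== PORT A =====
-- Counter(nums1) == Counter(nums2): Python dict equality (same keys as a set, same count per key)
def pvCounterEq (nums1 nums2 : List Int) : Bool :=
  let c1 : PySem.Dict Int Int := PySem.Dict.counter nums1
  let c2 : PySem.Dict Int Int := PySem.Dict.counter nums2
  c1.keys.all (fun x => c2.getD x 0 == c1.getD x 0) && c2.keys.all (fun x => c1.getD x 0 == c2.getD x 0)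

-- 'for g in d.values(): g.sort()' — every value list of the dict sorted in place
def pvSortVals (d : PySem.Dict Int (List Int)) : PySem.Dict Int (List Int) :=
  PySem.Dict.mk (d.items.map (fun p => (p.1, PySem.List.sorted p.2 (fun x => x))))

-- 'for mod in range(k): …' with the early 'return -1' (none) and the inner 'for a, b in zip: res += abs(a-b)//k'
def pvLoopA (g1 g2 : PySem.Dict Int (List Int)) (k : Int) : List Int → Int → Option Int
  | [], res => some res
  | m :: rest, res =>
    if (g1.getD m []).length ≠ (g2.getD m []).length then none
    else pvLoopA g1 g2 k rest
      (((g1.getD m []).zip (g2.getD m [])).foldl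
        (fun acc p => acc + PySem.Int.floordiv |p.1 - p.2| k) res)

def minOperations2 (nums1 : List Int) (nums2 : List Int) (k : Int) : Int :=
  if nums1.sum ≠ nums2.sum then -1
  else if k = 0 then (if pvCounterEq nums1 nums2 then 0 else -1)
  else
    let n : Int := PySem.List.len nums1
    let gs := (PySem.List.pyRange 0 n).foldl
      (fun (g : PySem.Dict Int (List Int) × PySem.Dict Int (List Int)) i =>
        (g.1.modify (PySem.Int.mod (PySem.List.pyGetD nums1 i 0) k) [] (· ++ [PySem.List.pyGetD nums1 i 0]),
         g.2.modify (PySem.Int.mod (PySem.List.pyGetD nums2 i 0) k) [] (· ++ [PySem.List.pyGetD nums2 i 0])))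
      (PySem.Dict.empty, PySem.Dict.empty)
    let g1 := pvSortVals gs.1
    let g2 := pvSortVals gs.2
    match pvLoopA g1 g2 k (PySem.List.pyRange 0 k) 0 with
    | none => -1
    | some res => PySem.Int.floordiv res 2

-- ===== PORT B =====
-- sorted(...) on 3-tuples compares them lexicographically: the sort key, made explicit
def evKey (e : Int × Int × Int) : Int ×ₗ (Int ×ₗ Int) := toLex (e.1, toLex (e.2.1, e.2.2))

-- one iteration of 'for _, v, t in events': state (total, bal, pv)
def pvStep (s : Int × Int × Int) (e : Int × Int × Int) : Int × Int × Int :=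
  (s.1 + |s.2.1| * (e.2.1 - s.2.2), s.2.1 + e.2.2, e.2.1)

def minOperations2_alt (nums1 : List Int) (nums2 : List Int) (k : Int) : Int :=
  if nums1.sum ≠ nums2.sum then -1
  else if k = 0 then
    (if PySem.List.sorted nums1 (fun x => x) = PySem.List.sorted nums2 (fun x => x) then 0 else -1)
  else if !(pvCounterEq (nums1.map (fun x => PySem.Int.mod x k)) (nums2.map (fun y => PySem.Int.mod y k))) then -1
  else
    let events := PySem.List.sorted
      (nums1.map (fun x => (PySem.Int.mod x k, x, (1 : Int))) ++
       nums2.map (fun y => (PySem.Int.mod y k, y, (-1 : Int)))) evKey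
    let st := events.foldl pvStep (0, 0, 0)
    PySem.Int.floordiv (PySem.Int.floordiv st.1 k) 2

-- ===== PRECONDITION & SPEC =====
-- Pre_ excludes only unequal-length inputs that reach A's grouping phase (equal sums and k ≠ 0):
-- there A indexes nums2 by range(len(nums1)), raising IndexError when nums2 is shorter and silently
-- ignoring nums2's tail when longer; with unequal sums or k = 0 unequal lengths are harmless.
def Pre_minOperations2 (nums1 : List Int) (nums2 : List Int) (k : Int) : Prop :=
  nums1.length = nums2.length ∨ nums1.sum ≠ nums2.sum ∨ k = 0
instance (nums1 : List Int) (nums2 : List Int) (k : Int) : Decidable (Pre_minOperations2 nums1 nums2 k) := by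
  unfold Pre_minOperations2; infer_instance
def pvWitness_minOperations2 : List Int × List Int × Int := ([1, 2], [2, 1], 2)

-- When k < 0, the sums are equal and the lists are not permutations of each other, A's 'for mod in range(k)'
-- loop never runs so A returns the leftover 0 (claiming success with zero operations), while B returns a
-- negative value or -1 from its own computation, signalling that no sequence of moves of size k < 0
-- equalises the arrays.
def D_minOperations2 (nums1 : List Int) (nums2 : List Int) (k : Int) : Prop :=
  k < 0 ∧ nums1.sum = nums2.sum ∧ ¬ nums1.Perm nums2
instance (nums1 : List Int) (nums2 : List Int) (k : Int) : Decidable (D_minOperations2 nums1 nums2 k) := by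
  unfold D_minOperations2; infer_instance

def Spec_minOperations2 (nums1 : List Int) (nums2 : List Int) (k : Int) (out : Int) : Prop :=
  ¬ D_minOperations2 nums1 nums2 k → out = minOperations2_alt nums1 nums2 k
instance (nums1 : List Int) (nums2 : List Int) (k : Int) (out : Int) : Decidable (Spec_minOperations2 nums1 nums2 k out) := by
  unfold Spec_minOperations2; infer_instance

def pvDiffWitness_minOperations2 : List Int × List Int × Int := ([0, 2], [1, 1], -1)
def pvDiffWitnessOut_minOperations2 : Int × Int := (0, -1)

-- ===== CLAIM (what is proved, stated in full; the proofs are below) =====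
def Claim_unchanged_minOperations2 : Prop := ∀ (nums1 : List Int) (nums2 : List Int) (k : Int), Dom_minOperations2 nums1 nums2 k → Pre_minOperations2 nums1 nums2 k → Spec_minOperations2 nums1 nums2 k (minOperations2 nums1 nums2 k)
def Claim_changed_minOperations2 : Prop := Dom_minOperations2 (pvDiffWitness_minOperations2.1) (pvDiffWitness_minOperations2.2.1) (pvDiffWitness_minOperations2.2.2) ∧ Pre_minOperations2 (pvDiffWitness_minOperations2.1) (pvDiffWitness_minOperations2.2.1) (pvDiffWitness_minOperations2.2.2) ∧ D_minOperations2 (pvDiffWitness_minOperations2.1) (pvDiffWitness_minOperations2.2.1) (pvDiffWitness_minOperations2.2.2) ∧ minOperations2 (pvDiffWitness_minOperations2.1) (pvDiffWitness_minOperations2.2.1) (pvDiffWitness_minOperations2.2.2) = pvDiffWitnessOut_minOperations2.1 ∧ minOperations2_alt (pvDiffWitness_minOperations2.1) (pvDiffWitness_minOperations2.2.1) (pvDiffWitness_minOperations2.2.2) = pvDiffWitnessOut_minOperations2.2 ∧ pvDiffWitnessOut_minOperations2.1 ≠ pvDiffWitnessOut_minOperations2.2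
def Claim_exact_minOperations2 : Prop := ∀ (nums1 : List Int) (nums2 : List Int) (k : Int), Dom_minOperations2 nums1 nums2 k → Pre_minOperations2 nums1 nums2 k → D_minOperations2 nums1 nums2 k → minOperations2 nums1 nums2 k ≠ minOperations2_alt nums1 nums2 k

-- ===== LEMMAS AND PROOFS =====

-- === sweep basics ===
def pvTags (E : List (Int × Int × Int)) : Int := (E.map (fun e => e.2.2)).sum

theorem evKey_inj : Function.Injective evKey := by
  intro a b h
  have h1 := congrArg (fun p => (ofLex p).1) h
  have h2 := congrArg (fun p => (ofLex (ofLex p).2).1) h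
  have h3 := congrArg (fun p => (ofLex (ofLex p).2).2) h
  simp [evKey] at h1 h2 h3
  exact Prod.ext h1 (Prod.ext h2 h3)

theorem sweep_bal (E : List (Int × Int × Int)) (T B p : Int) :
    (E.foldl pvStep (T, B, p)).2.1 = B + pvTags E := by
  induction E generalizing T B p with
  | nil => simp [pvTags]
  | cons e E ih => simp [pvStep, ih, pvTags]; ring

theorem sweep_total_shift (E : List (Int × Int × Int)) (T B p : Int) :
    (E.foldl pvStep (T, B, p)).1 = T + (E.foldl pvStep (0, B, p)).1 := by
  induction E generalizing T B p with
  | nil => simp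
  | cons e E ih =>
    simp only [List.foldl_cons, pvStep]
    rw [ih, ih (0 + |B| * (e.2.1 - p))]
    ring

def pvCost (E : List (Int × Int × Int)) : Int := (E.foldl pvStep (0, 0, 0)).1

theorem cost_pv_indep (E : List (Int × Int × Int)) (p : Int) :
    (E.foldl pvStep (0, 0, p)).1 = pvCost E := by
  cases E with
  | nil => rfl
  | cons e E => simp [pvCost, pvStep]

theorem cost_flatMap (ms : List Int) (f : Int → List (Int × Int × Int))
    (h : ∀ m ∈ ms, pvTags (f m) = 0) (T p : Int) :
    ((ms.flatMap f).foldl pvStep (T, 0, p)).1 = T + (ms.map (fun m => pvCost (f m))).sum := by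
  induction ms generalizing T p with
  | nil => simp
  | cons m ms ih =>
    simp only [List.flatMap_cons, List.foldl_append, List.map_cons, List.sum_cons]
    have hst : (f m).foldl pvStep (T, 0, p)
        = (T + pvCost (f m), 0, ((f m).foldl pvStep (T, 0, p)).2.2) := by
      have h1 : ((f m).foldl pvStep (T, 0, p)).1 = T + pvCost (f m) := by
        rw [sweep_total_shift, cost_pv_indep]
      have h2 : ((f m).foldl pvStep (T, 0, p)).2.1 = 0 := by
        rw [sweep_bal, h m (by simp)]; ring
      exact Prod.ext h1 (Prod.ext h2 rfl)
    rw [hst, ih (fun q hq => h q (by simp [hq]))]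
    ring

-- === interval characterisation of the sweep total ===
def pvBalC (E : List (Int × Int × Int)) (s : Int) : Int :=
  ((E.filter (fun e => decide (e.2.1 ≤ s))).map (fun e => e.2.2)).sum

theorem total_interval (E : List (Int × Int × Int)) (B p U : Int)
    (hs : E.Pairwise (fun e f => e.2.1 ≤ f.2.1))
    (hlow : ∀ e ∈ E, p ≤ e.2.1) (hup : ∀ e ∈ E, e.2.1 ≤ U) (hpU : p ≤ U) :
    (E.foldl pvStep (0, B, p)).1 + |B + pvTags E| * (U - (E.map (fun e => e.2.1)).getLastD p)
      = ∑ s ∈ Finset.Ico p U, |B + pvBalC E s| := by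
  induction E generalizing B p with
  | nil =>
    simp only [List.foldl_nil, pvTags, List.map_nil, List.sum_nil, List.getLastD_nil,
      pvBalC, List.filter_nil, add_zero]
    rw [Finset.sum_const, Int.card_Ico, nsmul_eq_mul]
    rw [Int.toNat_of_nonneg (by omega)]
    ring
  | cons e E ih =>
    obtain ⟨hhd, htl⟩ := List.pairwise_cons.mp hs
    have hpv : p ≤ e.2.1 := hlow e (by simp)
    have hvU : e.2.1 ≤ U := hup e (by simp)
    simp only [List.foldl_cons, pvStep, List.map_cons, List.getLastD_cons]
    rw [sweep_total_shift]
    have htags : pvTags (e :: E) = e.2.2 + pvTags E := by simp [pvTags]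
    rw [htags]
    have hIH := ih (B + e.2.2) e.2.1 htl (fun f hf => hhd f hf) (fun f hf => hup f (by simp [hf])) hvU
    have hsplit : (∑ s ∈ Finset.Ico p e.2.1, |B + pvBalC (e :: E) s|)
        + (∑ s ∈ Finset.Ico e.2.1 U, |B + pvBalC (e :: E) s|)
        = ∑ s ∈ Finset.Ico p U, |B + pvBalC (e :: E) s| := by
      rw [← Finset.sum_union (Finset.Ico_disjoint_Ico_consecutive p e.2.1 U),
        Finset.Ico_union_Ico_eq_Ico hpv hvU]
    have hL : ∑ s ∈ Finset.Ico p e.2.1, |B + pvBalC (e :: E) s| = |B| * (e.2.1 - p) := by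
      have hconst : ∀ s ∈ Finset.Ico p e.2.1, |B + pvBalC (e :: E) s| = |B| := by
        intro s hsmem
        have hslt : s < e.2.1 := (Finset.mem_Ico.mp hsmem).2
        have hfilt : (e :: E).filter (fun f => decide (f.2.1 ≤ s)) = [] := by
          rw [List.filter_eq_nil_iff]
          intro f hf
          rcases List.mem_cons.mp hf with rfl | hfE
          · simp; omega
          · have := hhd f hfE; simp; omega
        simp [pvBalC, hfilt]
      rw [Finset.sum_congr rfl hconst, Finset.sum_const, Int.card_Ico, nsmul_eq_mul,
        Int.toNat_of_nonneg (by omega)]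
      ring
    have hR : ∀ s ∈ Finset.Ico e.2.1 U, |B + pvBalC (e :: E) s| = |B + e.2.2 + pvBalC E s| := by
      intro s hsmem
      have hles : e.2.1 ≤ s := (Finset.mem_Ico.mp hsmem).1
      have : (e :: E).filter (fun f => decide (f.2.1 ≤ s)) = e :: E.filter (fun f => decide (f.2.1 ≤ s)) := by
        simp [hles]
      simp only [pvBalC, this, List.map_cons, List.sum_cons]
      ring_nf
    rw [← hsplit, hL, Finset.sum_congr rfl hR, ← hIH,
      show B + (e.2.2 + pvTags E) = B + e.2.2 + pvTags E from by ring]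
    ring
-- === balance = difference of ≤-counts; tags = length difference ===
theorem balC_perm {E E' : List (Int × Int × Int)} (h : E.Perm E') (s : Int) :
    pvBalC E s = pvBalC E' s := by
  unfold pvBalC
  exact List.Perm.sum_eq (List.Perm.map _ (List.Perm.filter _ h))

theorem tags_perm {E E' : List (Int × Int × Int)} (h : E.Perm E') :
    pvTags E = pvTags E' := by
  unfold pvTags
  exact List.Perm.sum_eq (List.Perm.map _ h)

theorem balC_tagged (a b : List Int) (g1 g2 : Int → Int) (s : Int) :
    pvBalC (a.map (fun x => (g1 x, x, (1 : Int))) ++ b.map (fun y => (g2 y, y, (-1 : Int)))) s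
      = (a.countP (fun x => decide (x ≤ s)) : Int) - (b.countP (fun x => decide (x ≤ s)) : Int) := by
  simp only [pvBalC, List.filter_append, List.filter_map, List.map_append, List.map_map,
    List.sum_append, Function.comp_def]
  rw [PySem.List.sum_map_const_int, PySem.List.sum_map_const_int,
    List.countP_eq_length_filter, List.countP_eq_length_filter]
  ring

theorem tags_tagged (a b : List Int) (g1 g2 : Int → Int) :
    pvTags (a.map (fun x => (g1 x, x, (1 : Int))) ++ b.map (fun y => (g2 y, y, (-1 : Int))))
      = (a.length : Int) - (b.length : Int) := by
  simp only [pvTags, List.map_append, List.map_map, List.sum_append, Function.comp_def]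
  rw [PySem.List.sum_map_const_int, PySem.List.sum_map_const_int]
  ring

-- === the pairing identity ===
def pairCost (a b : List Int) : Int := ((a.zip b).map (fun p => |p.1 - p.2|)).sum

theorem sum_ico_indicator (L U a0 b0 : Int) (hLa : L ≤ a0) (haU : a0 ≤ U) (hLb : L ≤ b0) (hbU : b0 ≤ U) :
    ∑ s ∈ Finset.Ico L U, |(if a0 ≤ s then (1 : Int) else 0) - (if b0 ≤ s then (1 : Int) else 0)|
      = |a0 - b0| := by
  rcases le_total a0 b0 with hab | hab
  · have hterm : ∀ s ∈ Finset.Ico L U,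
        |(if a0 ≤ s then (1 : Int) else 0) - (if b0 ≤ s then (1 : Int) else 0)|
          = if s ∈ Finset.Ico a0 b0 then (1 : Int) else 0 := by
      intro s _
      simp only [Finset.mem_Ico]
      split_ifs <;> simp_all <;> omega
    rw [Finset.sum_congr rfl hterm, Finset.sum_ite_mem,
      Finset.Ico_inter_Ico, Finset.sum_const, Int.card_Ico, nsmul_eq_mul, mul_one]
    rw [max_eq_right hLa, min_eq_right hbU]
    rw [abs_of_nonpos (by omega)]
    omega
  · have hterm : ∀ s ∈ Finset.Ico L U,
        |(if a0 ≤ s then (1 : Int) else 0) - (if b0 ≤ s then (1 : Int) else 0)|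
          = if s ∈ Finset.Ico b0 a0 then (1 : Int) else 0 := by
      intro s _
      simp only [Finset.mem_Ico]
      split_ifs <;> simp_all <;> omega
    rw [Finset.sum_congr rfl hterm, Finset.sum_ite_mem,
      Finset.Ico_inter_Ico, Finset.sum_const, Int.card_Ico, nsmul_eq_mul, mul_one]
    rw [max_eq_right hLb, min_eq_right haU]
    rw [abs_of_nonneg (by omega)]
    omega

theorem abs_indicator_split (x y u v : Int) (hx : x = 0 ∨ x = 1) (hy : y = 0 ∨ y = 1)
    (hu : 0 ≤ u) (hv : 0 ≤ v) (h1 : x = 0 → u = 0) (h2 : y = 0 → v = 0) :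
    |(x + u) - (y + v)| = |x - y| + |u - v| := by
  rcases hx with rfl | rfl <;> rcases hy with rfl | rfl
  · simp
  · rw [h1 rfl]
    rw [show (0 : Int) + 0 - (1 + v) = -(1 + v) from by ring, abs_neg,
      abs_of_nonneg (by omega), abs_of_nonpos (by omega), abs_of_nonpos (by omega)]
    ring
  · rw [h2 rfl]
    rw [show (1 : Int) + u - (0 + 0) = 1 + u from by ring,
      abs_of_nonneg (by omega), abs_of_nonneg (by omega), abs_of_nonneg (by omega)]
    ring
  · rw [show (1 : Int) + u - (1 + v) = u - v from by ring]
    simp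

theorem pairing_identity (L U : Int) :
    ∀ (a b : List Int), a.Pairwise (· ≤ ·) → b.Pairwise (· ≤ ·) → a.length = b.length →
      (∀ x ∈ a ++ b, L ≤ x ∧ x ≤ U) →
      ∑ s ∈ Finset.Ico L U, |(a.countP (fun x => decide (x ≤ s)) : Int) - (b.countP (fun x => decide (x ≤ s)) : Int)|
        = pairCost a b := by
  intro a
  induction a with
  | nil =>
    intro b _ _ hlen _
    have : b = [] := List.length_eq_zero_iff.mp (by simp at hlen; omega)
    subst this
    simp [pairCost]
  | cons a0 a' ih =>
    intro b ha hb hlen hbd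
    cases b with
    | nil => simp at hlen
    | cons b0 b' =>
      obtain ⟨ha0, ha'⟩ := List.pairwise_cons.mp ha
      obtain ⟨hb0, hb'⟩ := List.pairwise_cons.mp hb
      have hterm : ∀ s ∈ Finset.Ico L U,
          |((a0 :: a').countP (fun x => decide (x ≤ s)) : Int) - ((b0 :: b').countP (fun x => decide (x ≤ s)) : Int)|
            = |(if a0 ≤ s then (1 : Int) else 0) - (if b0 ≤ s then (1 : Int) else 0)|
              + |(a'.countP (fun x => decide (x ≤ s)) : Int) - (b'.countP (fun x => decide (x ≤ s)) : Int)| := by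
        intro s _
        rw [List.countP_cons, List.countP_cons]
        push_cast
        rw [show ((a'.countP (fun x => decide (x ≤ s)) : Int) + (if decide (a0 ≤ s) = true then (1:Int) else 0))
            - ((b'.countP (fun x => decide (x ≤ s)) : Int) + (if decide (b0 ≤ s) = true then (1:Int) else 0))
            = ((if decide (a0 ≤ s) = true then (1:Int) else 0) + (a'.countP (fun x => decide (x ≤ s)) : Int))
            - ((if decide (b0 ≤ s) = true then (1:Int) else 0) + (b'.countP (fun x => decide (x ≤ s)) : Int)) from by ring]
        have himp1 : (if decide (a0 ≤ s) = true then (1 : Int) else 0) = 0 →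
            ((a'.countP (fun x => decide (x ≤ s)) : Int)) = 0 := by
          intro h0
          have hna : ¬ a0 ≤ s := by by_contra hc; simp [hc] at h0
          have hz : a'.countP (fun x => decide (x ≤ s)) = 0 :=
            List.countP_eq_zero.mpr (fun x hx => by have := ha0 x hx; simp; omega)
          simp [hz]
        have himp2 : (if decide (b0 ≤ s) = true then (1 : Int) else 0) = 0 →
            ((b'.countP (fun x => decide (x ≤ s)) : Int)) = 0 := by
          intro h0
          have hnb : ¬ b0 ≤ s := by by_contra hc; simp [hc] at h0
          have hz : b'.countP (fun x => decide (x ≤ s)) = 0 :=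
            List.countP_eq_zero.mpr (fun x hx => by have := hb0 x hx; simp; omega)
          simp [hz]
        rw [abs_indicator_split _ _ _ _ (by split_ifs <;> simp) (by split_ifs <;> simp)
          (by positivity) (by positivity) himp1 himp2]
        simp
      rw [Finset.sum_congr rfl hterm, Finset.sum_add_distrib]
      have hA := hbd a0 (by simp)
      have hB := hbd b0 (by simp)
      rw [sum_ico_indicator L U a0 b0 hA.1 hA.2 hB.1 hB.2]
      rw [ih b' ha' hb' (by simpa using hlen)
        (fun x hx => hbd x (by rcases List.mem_append.mp hx with h | h <;> simp [h]))]
      simp [pairCost]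
-- === A-side lemmas ===
theorem groups_fold_eq (nums : List Int) (k : Int) :
    (PySem.List.pyRange 0 (PySem.List.len nums)).foldl
      (fun d i => d.modify (PySem.Int.mod (PySem.List.pyGetD nums i 0) k) [] (· ++ [PySem.List.pyGetD nums i 0]))
      PySem.Dict.empty
    = nums.foldl (fun d x => d.modify (PySem.Int.mod x k) [] (· ++ [x])) PySem.Dict.empty := by
  conv_rhs => rw [← PySem.List.map_pyGetD_pyRange_zero nums 0]
  rw [List.foldl_map]

theorem getD_group (nums : List Int) (k m : Int) :
    ((nums.foldl (fun d x => d.modify (PySem.Int.mod x k) [] (· ++ [x])) PySem.Dict.empty).getD m [])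
      = nums.filter (fun x => PySem.Int.mod x k == m) := by
  have h1 : nums.foldl (fun d x => d.modify (PySem.Int.mod x k) [] (· ++ [x])) PySem.Dict.empty
      = (nums.map (fun x => (PySem.Int.mod x k, x))).foldl
          (fun d p => d.modify p.1 [] (· ++ [p.2])) PySem.Dict.empty := by
    rw [List.foldl_map]
  rw [h1, PySem.Dict.getD_foldl_modify_append]
  simp [List.filter_map, Function.comp_def]

theorem get?_mapVals (f : List Int → List Int) (l : List (Int × List Int)) (m : Int) :
    (PySem.Dict.mk (l.map (fun p => (p.1, f p.2)))).get? m = ((PySem.Dict.mk l).get? m).map f := by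
  induction l with
  | nil => rfl
  | cons p t ih =>
    simp only [List.map_cons]
    rw [PySem.Dict.get?_mk_cons, PySem.Dict.get?_mk_cons]
    by_cases hm : p.1 == m
    · simp [hm]
    · simp [hm, ih]

theorem getD_sortVals (d : PySem.Dict Int (List Int)) (m : Int) :
    (pvSortVals d).getD m [] = PySem.List.sorted (d.getD m []) (fun x => x) := by
  unfold pvSortVals
  rw [PySem.Dict.getD_eq_get?_getD]
  cases d with | mk items =>
  dsimp only
  rw [get?_mapVals (fun l => PySem.List.sorted l (fun x => x))]
  cases h : (PySem.Dict.mk items).get? m with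
  | none => simp [PySem.Dict.getD_eq_get?_getD, h]; rfl
  | some v => simp [PySem.Dict.getD_eq_get?_getD, h]

theorem sum_ite_mem (ms : List Int) (c : Int) (v : Nat) (hnd : ms.Nodup) (hc : c ∈ ms) :
    (ms.map (fun m => if c = m then v else 0)).sum = v := by
  induction ms with
  | nil => cases hc
  | cons m t ih =>
    rcases List.mem_cons.mp hc with rfl | hct
    · simp only [List.map_cons, List.sum_cons]
      have h0 : (t.map (fun m => if c = m then v else 0)).sum = 0 := by
        apply List.sum_eq_zero
        intro x hx
        rcases List.mem_map.mp hx with ⟨m', hm', rfl⟩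
        have : c ≠ m' := fun h => (List.nodup_cons.mp hnd).1 (h ▸ hm')
        simp [this]
      simp [h0]
    · have hne : c ≠ m := fun h => (List.nodup_cons.mp hnd).1 (h ▸ hct)
      simp only [List.map_cons, List.sum_cons, if_neg hne]
      rw [ih (List.nodup_cons.mp hnd).2 hct]
      omega

theorem loopA_some (g1 g2 : PySem.Dict Int (List Int)) (k : Int) (ms : List Int) (res : Int)
    (h : ∀ m ∈ ms, (g1.getD m []).length = (g2.getD m []).length) :
    pvLoopA g1 g2 k ms res = some (res + (ms.map (fun m =>
      (((g1.getD m []).zip (g2.getD m [])).map (fun p => PySem.Int.floordiv |p.1 - p.2| k)).sum)).sum) := by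
  induction ms generalizing res with
  | nil => simp [pvLoopA]
  | cons m t ih =>
    have hm := h m (by simp)
    simp only [pvLoopA, hm, ne_eq, not_true_eq_false, if_false]
    rw [ih _ (fun q hq => h q (by simp [hq]))]
    rw [PySem.List.foldl_add]
    simp; ring

theorem loopA_none (g1 g2 : PySem.Dict Int (List Int)) (k : Int) (ms : List Int) (res : Int)
    (h : ∃ m ∈ ms, (g1.getD m []).length ≠ (g2.getD m []).length) :
    pvLoopA g1 g2 k ms res = none := by
  induction ms generalizing res with
  | nil => simp at h
  | cons m t ih =>
    by_cases hm : (g1.getD m []).length = (g2.getD m []).length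
    · simp only [pvLoopA, hm, ne_eq, not_true_eq_false, if_false]
      rcases h with ⟨q, hq, hne⟩
      rcases List.mem_cons.mp hq with rfl | hq
      · exact absurd hm hne
      · exact ih _ ⟨q, hq, hne⟩
    · simp [pvLoopA, hm]

theorem pvCounterEq_iff (nums1 nums2 : List Int) :
    pvCounterEq nums1 nums2 = true ↔ nums1.Perm nums2 := by
  unfold pvCounterEq
  simp only [Bool.and_eq_true, List.all_eq_true, PySem.Dict.getD_counter, PySem.Dict.keys_counter,
    beq_iff_eq]
  constructor
  · rintro ⟨h1, h2⟩
    rw [List.perm_iff_count]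
    intro a
    by_cases ha1 : a ∈ nums1
    · exact_mod_cast (h1 a (by simp [PySem.Set.mem_ofList, ha1])).symm
    · by_cases ha2 : a ∈ nums2
      · exact_mod_cast h2 a (by simp [PySem.Set.mem_ofList, ha2])
      · simp [List.count_eq_zero_of_not_mem, ha1, ha2]
  · intro hp
    constructor <;> intro x _ <;> rw [hp.count_eq]

theorem pv_zip_self (xs : List Int) : xs.zip xs = xs.map (fun x => (x, x)) := by
  induction xs <;> simp [*]

theorem floordiv_nonpos_of_neg (a k : Int) (hk : k < 0) (ha : 0 ≤ a) :
    PySem.Int.floordiv a k ≤ 0 := by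
  have h := PySem.Int.floordiv_mul_add_mod a k
  have hb := PySem.Int.mod_neg_bounds a hk
  by_contra h0
  push_neg at h0
  have h1 : PySem.Int.floordiv a k * k ≤ 1 * k :=
    mul_le_mul_of_nonpos_right (by omega) (le_of_lt hk)
  omega

theorem floordiv_le_neg_one (a k : Int) (hk : k < 0) (ha : 0 < a) :
    PySem.Int.floordiv a k ≤ -1 := by
  have h := PySem.Int.floordiv_mul_add_mod a k
  have hb := PySem.Int.mod_neg_bounds a hk
  have h0 := floordiv_nonpos_of_neg a k hk (le_of_lt ha)
  rcases lt_or_eq_of_le h0 with h1 | h1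
  · omega
  · exfalso; rw [h1] at h; simp at h; omega

-- === pyRange is strictly increasing ===
theorem pyRange_pairwise_lt (a b : Int) : (PySem.List.pyRange a b).Pairwise (· < ·) := by
  suffices H : ∀ (n : Nat) (a b : Int), (b - a).toNat ≤ n → (PySem.List.pyRange a b).Pairwise (· < ·) from
    H (b - a).toNat a b le_rfl
  intro n
  induction n with
  | zero =>
    intro a b h
    have : PySem.List.pyRange a b = [] := by simp [PySem.List.pyRange]; omega
    simp [this]
  | succ n ih =>
    intro a b h
    by_cases hab : a < b
    · rw [PySem.List.pyRange_one_cons hab]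
      refine List.pairwise_cons.mpr ⟨?_, ih (a + 1) b (by omega)⟩
      intro x hx
      have := PySem.List.mem_pyRange_one.mp hx
      omega
    · have : PySem.List.pyRange a b = [] := by simp [PySem.List.pyRange]; omega
      simp [this]
-- === the lex-sorted event list splits into per-residue blocks ===
def key2 (e : Int × Int × Int) : Int ×ₗ Int := toLex (e.2.1, e.2.2)

theorem sorted_ev_flatMap (Ev : List (Int × Int × Int)) (ms : List Int)
    (hpw : ms.Pairwise (· < ·)) (hall : ∀ e ∈ Ev, e.1 ∈ ms) :
    PySem.List.sorted Ev evKey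
      = ms.flatMap (fun m => PySem.List.sorted (Ev.filter (fun e => e.1 == m)) key2) := by
  have hnd : ms.Nodup := hpw.imp ne_of_lt
  apply PySem.List.eq_of_perm_of_pairwise_le_of_injective evKey evKey_inj
  · refine (PySem.List.sorted_perm Ev evKey false).trans (List.perm_iff_count.mpr ?_).symm
    intro a
    rw [List.count_eq_countP, List.countP_flatMap]
    have hterm : ∀ m ∈ ms,
        (List.countP (fun x => x == a) ∘ fun m => PySem.List.sorted (Ev.filter (fun e => e.1 == m)) key2) m
          = if a.1 = m then Ev.count a else 0 := by
      intro m _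
      simp only [Function.comp]
      rw [(PySem.List.sorted_perm _ _ _).countP_eq]
      by_cases hma : a.1 = m
      · rw [if_pos hma, ← List.count_eq_countP, List.count_filter (by simp [hma])]
      · rw [if_neg hma]
        apply List.countP_eq_zero.mpr
        intro x hx hxa
        have hx1 : x.1 = m := by simpa using (List.mem_filter.mp hx).2
        exact hma (by rw [← eq_of_beq hxa]; exact hx1)
    rw [List.map_congr_left hterm]
    by_cases haEv : a ∈ Ev
    · rw [sum_ite_mem ms a.1 (Ev.count a) hnd (hall a haEv)]
    · have h0 : Ev.count a = 0 := List.count_eq_zero.mpr haEv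
      rw [h0]
      simp
  · exact PySem.List.sorted_pairwise Ev evKey
  · rw [List.pairwise_flatMap]
    constructor
    · intro m _
      refine List.Pairwise.imp_of_mem ?_ (PySem.List.sorted_pairwise _ key2)
      intro e f he hf hef
      have h1 : e.1 = m := by
        simpa using (List.mem_filter.mp ((PySem.List.mem_sorted _ _ _ _).mp he)).2
      have h2 : f.1 = m := by
        simpa using (List.mem_filter.mp ((PySem.List.mem_sorted _ _ _ _).mp hf)).2
      rw [evKey, evKey, Prod.Lex.le_iff]
      right
      exact ⟨by simp [h1, h2], hef⟩
    · refine hpw.imp_of_mem ?_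
      intro m1 m2 _ _ h12 e he f hf
      have h1 : e.1 = m1 := by
        simpa using (List.mem_filter.mp ((PySem.List.mem_sorted _ _ _ _).mp he)).2
      have h2 : f.1 = m2 := by
        simpa using (List.mem_filter.mp ((PySem.List.mem_sorted _ _ _ _).mp hf)).2
      rw [evKey, evKey, Prod.Lex.le_iff]
      left
      simpa [h1, h2] using h12
-- === per-residue groups and the merged event list ===
def pvG (l : List Int) (k m : Int) : List Int :=
  PySem.List.sorted (l.filter (fun x => PySem.Int.mod x k == m)) (fun x => x)

def pvEv (n1 n2 : List Int) (k : Int) : List (Int × Int × Int) :=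
  n1.map (fun x => (PySem.Int.mod x k, x, (1 : Int))) ++
  n2.map (fun y => (PySem.Int.mod y k, y, (-1 : Int)))

theorem filter_Ev (n1 n2 : List Int) (k m : Int) :
    (pvEv n1 n2 k).filter (fun e => e.1 == m)
      = (n1.filter (fun x => PySem.Int.mod x k == m)).map (fun x => (PySem.Int.mod x k, x, (1 : Int)))
        ++ (n2.filter (fun y => PySem.Int.mod y k == m)).map (fun y => (PySem.Int.mod y k, y, (-1 : Int))) := by
  simp [pvEv, List.filter_append, List.filter_map, Function.comp_def]

theorem Sm_perm (n1 n2 : List Int) (k m : Int) :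
    (PySem.List.sorted ((pvEv n1 n2 k).filter (fun e => e.1 == m)) key2).Perm
      ((pvG n1 k m).map (fun x => (PySem.Int.mod x k, x, (1 : Int)))
        ++ (pvG n2 k m).map (fun y => (PySem.Int.mod y k, y, (-1 : Int)))) := by
  refine (PySem.List.sorted_perm _ _ _).trans ?_
  rw [filter_Ev]
  exact List.Perm.append
    (List.Perm.map _ (PySem.List.sorted_perm _ _ _).symm)
    (List.Perm.map _ (PySem.List.sorted_perm _ _ _).symm)

theorem pairCost_nonneg (a b : List Int) : 0 ≤ pairCost a b := by
  apply List.sum_nonneg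
  intro x hx
  rcases List.mem_map.mp hx with ⟨p, _, rfl⟩
  exact abs_nonneg _

theorem pairCost_self (a : List Int) : pairCost a a = 0 := by
  unfold pairCost
  rw [pv_zip_self]
  apply List.sum_eq_zero
  intro x hx
  rcases List.mem_map.mp hx with ⟨p, hp, rfl⟩
  rcases List.mem_map.mp hp with ⟨y, _, rfl⟩
  simp

theorem sum_ge_one {l : List Int} {y : Int} (h0 : ∀ x ∈ l, 0 ≤ x) (hy : y ∈ l) (hy1 : 1 ≤ y) :
    1 ≤ l.sum := by
  induction l with
  | nil => cases hy
  | cons a t ih =>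
    simp only [List.sum_cons]
    rcases List.mem_cons.mp hy with rfl | hyt
    · have : 0 ≤ t.sum := List.sum_nonneg (fun x hx => h0 x (by simp [hx]))
      omega
    · have ha := h0 a (by simp)
      have := ih (fun x hx => h0 x (by simp [hx])) hyt
      omega

theorem pairCost_pos (a b : List Int) (hlen : a.length = b.length) (hne : a ≠ b) :
    1 ≤ pairCost a b := by
  have hex : ∃ p ∈ a.zip b, p.1 ≠ p.2 := by
    by_contra hal
    push_neg at hal
    apply hne
    apply List.ext_getElem hlen
    intro i h1 h2
    exact hal (a[i], b[i]) (by
      have hz : i < (a.zip b).length := by simp [List.length_zip]; omega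
      have := List.getElem_zip (l := a) (l' := b) (i := i) (h := hz)
      rw [← this]
      exact List.getElem_mem hz)
  rcases hex with ⟨p, hpz, hpne⟩
  apply sum_ge_one (y := |p.1 - p.2|)
  · intro x hx
    rcases List.mem_map.mp hx with ⟨q, _, rfl⟩
    exact abs_nonneg _
  · exact List.mem_map.mpr ⟨p, hpz, rfl⟩
  · have : p.1 - p.2 ≠ 0 := fun h => hpne (by omega)
    have h2 : 0 < |p.1 - p.2| := abs_pos.mpr this
    omega

-- cost of one residue block = cost of the sorted pairing of its two groups
theorem cost_Sm (n1 n2 : List Int) (k m : Int)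
    (hbd : ∀ x ∈ n1 ++ n2, -2147483648 ≤ x ∧ x ≤ 2147483648)
    (hlen : (pvG n1 k m).length = (pvG n2 k m).length) :
    pvCost (PySem.List.sorted ((pvEv n1 n2 k).filter (fun e => e.1 == m)) key2)
      = pairCost (pvG n1 k m) (pvG n2 k m) := by
  set L : Int := -2147483648
  set U : Int := 2147483648
  set E := PySem.List.sorted ((pvEv n1 n2 k).filter (fun e => e.1 == m)) key2 with hE
  have hmemE : ∀ e ∈ E, e.2.1 ∈ n1 ∨ e.2.1 ∈ n2 := by
    intro e he
    have h1 := (List.mem_filter.mp ((PySem.List.mem_sorted _ _ _ _).mp he)).1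
    unfold pvEv at h1
    rcases List.mem_append.mp h1 with h | h
    · rcases List.mem_map.mp h with ⟨x, hx, rfl⟩; exact Or.inl hx
    · rcases List.mem_map.mp h with ⟨y, hy, rfl⟩; exact Or.inr hy
  have hvalbd : ∀ e ∈ E, L ≤ e.2.1 ∧ e.2.1 ≤ U := by
    intro e he
    rcases hmemE e he with h | h
    · exact hbd e.2.1 (List.mem_append.mpr (Or.inl h))
    · exact hbd e.2.1 (List.mem_append.mpr (Or.inr h))
  have hsorted : E.Pairwise (fun e f => e.2.1 ≤ f.2.1) := by
    refine (PySem.List.sorted_pairwise _ key2).imp ?_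
    intro e f hef
    rcases Prod.Lex.le_iff.mp hef with h | h
    · exact le_of_lt h
    · exact le_of_eq h.1
  have htags : pvTags E = 0 := by
    rw [tags_perm (Sm_perm n1 n2 k m), tags_tagged]
    rw [hlen]
    ring
  have htot := total_interval E 0 L U hsorted (fun e he => (hvalbd e he).1)
    (fun e he => (hvalbd e he).2) (by norm_num)
  rw [htags] at htot
  simp only [add_zero, abs_zero, zero_mul] at htot
  have hbalc : ∀ s, pvBalC E s
      = ((pvG n1 k m).countP (fun x => decide (x ≤ s)) : Int)
        - ((pvG n2 k m).countP (fun x => decide (x ≤ s)) : Int) := by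
    intro s
    rw [balC_perm (Sm_perm n1 n2 k m), balC_tagged]
  have hpair := pairing_identity L U (pvG n1 k m) (pvG n2 k m)
    ((PySem.List.sorted_pairwise _ _).imp (fun h => h))
    ((PySem.List.sorted_pairwise _ _).imp (fun h => h))
    hlen
    (by
      intro x hx
      rcases List.mem_append.mp hx with h | h
      · have : x ∈ n1 := (List.mem_filter.mp ((PySem.List.mem_sorted _ _ _ _).mp h)).1
        exact hbd x (List.mem_append.mpr (Or.inl this))
      · have : x ∈ n2 := (List.mem_filter.mp ((PySem.List.mem_sorted _ _ _ _).mp h)).1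
        exact hbd x (List.mem_append.mpr (Or.inr this)))
  calc pvCost E = (E.foldl pvStep (0, 0, L)).1 := (cost_pv_indep E L).symm
    _ = ∑ s ∈ Finset.Ico L U, |(0 : Int) + pvBalC E s| := htot
    _ = pairCost (pvG n1 k m) (pvG n2 k m) := by
        rw [← hpair]
        refine Finset.sum_congr rfl ?_
        intro s _
        rw [hbalc s, zero_add]

-- the whole sweep total over the lex-sorted event list
theorem alt_main (n1 n2 : List Int) (k : Int) (ms : List Int)
    (hpw : ms.Pairwise (· < ·))
    (hallm : ∀ x ∈ n1 ++ n2, PySem.Int.mod x k ∈ ms)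
    (hbd : ∀ x ∈ n1 ++ n2, -2147483648 ≤ x ∧ x ≤ 2147483648)
    (hlens : ∀ m ∈ ms, (pvG n1 k m).length = (pvG n2 k m).length) :
    ((PySem.List.sorted (pvEv n1 n2 k) evKey).foldl pvStep (0, 0, 0)).1
      = (ms.map (fun m => pairCost (pvG n1 k m) (pvG n2 k m))).sum := by
  have hallE : ∀ e ∈ pvEv n1 n2 k, e.1 ∈ ms := by
    intro e he
    rcases List.mem_append.mp he with h | h
    · rcases List.mem_map.mp h with ⟨x, hx, rfl⟩
      exact hallm x (List.mem_append.mpr (Or.inl hx))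
    · rcases List.mem_map.mp h with ⟨y, hy, rfl⟩
      exact hallm y (List.mem_append.mpr (Or.inr hy))
  rw [sorted_ev_flatMap (pvEv n1 n2 k) ms hpw hallE]
  rw [cost_flatMap ms _ (fun m hm => by
    rw [tags_perm (Sm_perm n1 n2 k m), tags_tagged, hlens m hm]
    ring) 0 0]
  rw [zero_add]
  exact congrArg List.sum (List.map_congr_left (fun m hm => cost_Sm n1 n2 k m hbd (hlens m hm)))

-- === arithmetic: exact floor division distributes over sums of multiples ===
theorem floordiv_exact (k d : Int) (hk : k ≠ 0) (hd : k ∣ d) :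
    PySem.Int.floordiv d k * k = d := by
  have hm : PySem.Int.mod d k = 0 := (PySem.Int.mod_eq_zero_iff_dvd d k).mpr hd
  have := PySem.Int.floordiv_mul_add_mod d k
  omega

theorem floordiv_zero_left (k : Int) (hk : k ≠ 0) : PySem.Int.floordiv 0 k = 0 := by
  have h := floordiv_exact k 0 hk ⟨0, by ring⟩
  rcases mul_eq_zero.mp h with h | h
  · exact h
  · exact absurd h hk

theorem sum_floordiv_mul (k : Int) (hk : k ≠ 0) (l : List Int) (h : ∀ d ∈ l, k ∣ d) :
    (l.map (fun d => PySem.Int.floordiv d k)).sum * k = l.sum := by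
  induction l with
  | nil => simp
  | cons d t ih =>
    simp only [List.map_cons, List.sum_cons, add_mul]
    rw [ih (fun x hx => h x (by simp [hx])), floordiv_exact k d hk (h d (by simp))]

theorem sum_floordiv (k : Int) (hk : k ≠ 0) (l : List Int) (h : ∀ d ∈ l, k ∣ d) :
    (l.map (fun d => PySem.Int.floordiv d k)).sum = PySem.Int.floordiv l.sum k := by
  apply mul_right_cancel₀ hk
  rw [sum_floordiv_mul k hk l h, floordiv_exact k l.sum hk (List.dvd_sum h)]

theorem dvd_sub_of_mod_eq (a b k : Int) (h : PySem.Int.mod a k = PySem.Int.mod b k) :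
    k ∣ (a - b) := by
  have ha := PySem.Int.floordiv_mul_add_mod a k
  have hb := PySem.Int.floordiv_mul_add_mod b k
  exact ⟨PySem.Int.floordiv a k - PySem.Int.floordiv b k, by linear_combination - ha + hb + h⟩

-- === residue counts: group sizes vs Counter of residues ===
theorem length_G (l : List Int) (k m : Int) :
    (pvG l k m).length = l.countP (fun x => PySem.Int.mod x k == m) := by
  unfold pvG
  rw [PySem.List.length_sorted, ← List.countP_eq_length_filter]

theorem count_map_mod (l : List Int) (k m : Int) :
    (l.map (fun x => PySem.Int.mod x k)).count m = l.countP (fun x => PySem.Int.mod x k == m) := by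
  rw [List.count_eq_countP, List.countP_map]
  rfl

theorem counterEq_iff_lens (n1 n2 : List Int) (k : Int) (ms : List Int)
    (hallm : ∀ x ∈ n1 ++ n2, PySem.Int.mod x k ∈ ms) :
    pvCounterEq (n1.map (fun x => PySem.Int.mod x k)) (n2.map (fun y => PySem.Int.mod y k)) = true
      ↔ ∀ m ∈ ms, (pvG n1 k m).length = (pvG n2 k m).length := by
  rw [pvCounterEq_iff]
  constructor
  · intro hp m _
    rw [length_G, length_G, ← count_map_mod, ← count_map_mod, hp.count_eq]
  · intro h
    rw [List.perm_iff_count]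
    intro a
    by_cases ha : a ∈ n1.map (fun x => PySem.Int.mod x k) ∨ a ∈ n2.map (fun y => PySem.Int.mod y k)
    · have hams : a ∈ ms := by
        rcases ha with h' | h'
        · rcases List.mem_map.mp h' with ⟨x, hx, rfl⟩
          exact hallm x (List.mem_append.mpr (Or.inl hx))
        · rcases List.mem_map.mp h' with ⟨y, hy, rfl⟩
          exact hallm y (List.mem_append.mpr (Or.inr hy))
      rw [count_map_mod, count_map_mod, ← length_G, ← length_G]
      exact h a hams
    · push_neg at ha
      rw [List.count_eq_zero.mpr ha.1, List.count_eq_zero.mpr ha.2]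
theorem hG_eq (l : List Int) (k m : Int) :
    (pvSortVals (l.foldl (fun d x => d.modify (PySem.Int.mod x k) [] (· ++ [x])) PySem.Dict.empty)).getD m []
      = pvG l k m := by
  rw [getD_sortVals, getD_group]; rfl

theorem mem_G_mod {l : List Int} {k m x : Int} (hx : x ∈ pvG l k m) : PySem.Int.mod x k = m := by
  have := List.mem_filter.mp ((PySem.List.mem_sorted _ _ _ _).mp hx)
  simpa using this.2

-- A's Σ floordiv over a group equals floordiv of B's pairing cost (k ≠ 0)
theorem group_res_eq (n1 n2 : List Int) (k m : Int) (hk : k ≠ 0) :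
    (((pvG n1 k m).zip (pvG n2 k m)).map (fun p => PySem.Int.floordiv |p.1 - p.2| k)).sum
      = PySem.Int.floordiv (pairCost (pvG n1 k m) (pvG n2 k m)) k := by
  have hdvd : ∀ d ∈ ((pvG n1 k m).zip (pvG n2 k m)).map (fun p => |p.1 - p.2|), k ∣ d := by
    intro d hd
    rcases List.mem_map.mp hd with ⟨p, hp, rfl⟩
    have h1 := mem_G_mod (List.of_mem_zip hp).1
    have h2 := mem_G_mod (List.of_mem_zip hp).2
    exact (dvd_abs k _).mpr (dvd_sub_of_mod_eq p.1 p.2 k (h1.trans h2.symm))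
  have := sum_floordiv k hk (((pvG n1 k m).zip (pvG n2 k m)).map (fun p => |p.1 - p.2|)) hdvd
  rw [List.map_map] at this
  exact this

theorem dvd_pairCost (n1 n2 : List Int) (k m : Int) :
    k ∣ pairCost (pvG n1 k m) (pvG n2 k m) := by
  apply List.dvd_sum
  intro d hd
  rcases List.mem_map.mp hd with ⟨p, hp, rfl⟩
  have h1 := mem_G_mod (List.of_mem_zip hp).1
  have h2 := mem_G_mod (List.of_mem_zip hp).2
  exact (dvd_abs k _).mpr (dvd_sub_of_mod_eq p.1 p.2 k (h1.trans h2.symm))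

-- ===== VERDICT (by name: the statement is the Claim_ definition above) =====
theorem minOperations2_spec : Claim_unchanged_minOperations2 := by
  unfold Claim_unchanged_minOperations2
  intro n1 n2 k hdom hpre
  unfold Spec_minOperations2
  intro hnd
  unfold Pre_minOperations2 at hpre
  have hbd : ∀ x ∈ n1 ++ n2, -2147483648 ≤ x ∧ x ≤ 2147483648 := by
    unfold Dom_minOperations2 at hdom
    simp only [Bool.and_eq_true, List.all_eq_true, pvDomInt, decide_eq_true_eq] at hdom
    intro x hx
    rcases List.mem_append.mp hx with h | h
    · exact hdom.1.1 x h
    · exact hdom.1.2 x h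
  by_cases hsum : n1.sum = n2.sum
  case neg =>
    unfold minOperations2 minOperations2_alt
    rw [if_pos hsum, if_pos hsum]
  case pos =>
  by_cases hk0 : k = 0
  · subst hk0
    unfold minOperations2 minOperations2_alt
    rw [if_neg (not_not_intro hsum), if_neg (not_not_intro hsum), if_pos rfl, if_pos rfl]
    by_cases hperm : n1.Perm n2
    · rw [if_pos ((pvCounterEq_iff n1 n2).mpr hperm),
        if_pos ((PySem.List.sorted_id_eq_sorted_id_iff_perm n1 n2).mpr hperm)]
    · rw [if_neg (fun h => hperm ((pvCounterEq_iff n1 n2).mp h)),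
        if_neg (fun h => hperm ((PySem.List.sorted_id_eq_sorted_id_iff_perm n1 n2).mp h))]
  · have hlen : n1.length = n2.length := by
      rcases hpre with h | h | h
      · exact h
      · exact absurd hsum h
      · exact absurd h hk0
    rcases lt_or_gt_of_ne hk0 with hkneg | hkpos
    · -- k < 0 : outside D_ means the lists are permutations; both sides give 0
      have hperm : n1.Perm n2 := by
        by_contra hnp
        exact hnd ⟨hkneg, hsum, hnp⟩
      have hr : PySem.List.pyRange 0 k = [] := by simp [PySem.List.pyRange]; omega
      have hA : minOperations2 n1 n2 k = PySem.Int.floordiv 0 2 := by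
        unfold minOperations2
        rw [if_neg (not_not_intro hsum), if_neg hk0]
        simp only [hr]
        rfl
      have hcnt : pvCounterEq (n1.map (fun x => PySem.Int.mod x k)) (n2.map (fun y => PySem.Int.mod y k)) = true :=
        (pvCounterEq_iff _ _).mpr (hperm.map _)
      have hlens : ∀ m ∈ PySem.List.pyRange (k + 1) 1, pvG n1 k m = pvG n2 k m := by
        intro m _
        exact PySem.List.sorted_eq_sorted_of_perm _ _ (fun x => x) (fun a b h => h) (hperm.filter _)
      have hallm : ∀ x ∈ n1 ++ n2, PySem.Int.mod x k ∈ PySem.List.pyRange (k + 1) 1 := by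
        intro x _
        have := PySem.Int.mod_neg_bounds x hkneg
        exact PySem.List.mem_pyRange_one.mpr ⟨by omega, by omega⟩
      have htot := alt_main n1 n2 k (PySem.List.pyRange (k + 1) 1) (pyRange_pairwise_lt _ _)
        hallm hbd (fun m hm => by rw [hlens m hm])
      have htot0 : ((PySem.List.sorted (pvEv n1 n2 k) evKey).foldl pvStep (0, 0, 0)).1 = 0 := by
        rw [htot]
        apply List.sum_eq_zero
        intro x hx
        rcases List.mem_map.mp hx with ⟨m, hm, rfl⟩
        rw [hlens m hm, pairCost_self]
      have hB : minOperations2_alt n1 n2 k = PySem.Int.floordiv 0 2 := by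
        unfold minOperations2_alt
        rw [if_neg (not_not_intro hsum), if_neg hk0]
        simp only [hcnt, Bool.not_true, Bool.false_eq_true, if_false]
        show PySem.Int.floordiv (PySem.Int.floordiv ((PySem.List.sorted (pvEv n1 n2 k) evKey).foldl pvStep (0, 0, 0)).1 k) 2 = _
        rw [htot0, floordiv_zero_left k hk0]
      rw [hA, hB]
    · -- k > 0 : the main case
      have hallm : ∀ x ∈ n1 ++ n2, PySem.Int.mod x k ∈ PySem.List.pyRange 0 k := by
        intro x _
        exact PySem.List.mem_pyRange_one.mpr ⟨PySem.Int.mod_nonneg x hkpos, PySem.Int.mod_lt x hkpos⟩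
      have hlenI : PySem.List.len n1 = PySem.List.len n2 := by
        simp [PySem.List.len, hlen]
      unfold minOperations2 minOperations2_alt
      rw [if_neg (not_not_intro hsum), if_neg (not_not_intro hsum), if_neg hk0, if_neg hk0]
      dsimp only
      have hsplit := PySem.List.foldl_prod_mk
        (f := fun (d : PySem.Dict Int (List Int)) (i : Int) =>
          d.modify (PySem.Int.mod (PySem.List.pyGetD n1 i 0) k) [] (· ++ [PySem.List.pyGetD n1 i 0]))
        (g := fun (d : PySem.Dict Int (List Int)) (i : Int) =>
          d.modify (PySem.Int.mod (PySem.List.pyGetD n2 i 0) k) [] (· ++ [PySem.List.pyGetD n2 i 0]))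
        (l := PySem.List.pyRange 0 (PySem.List.len n1))
        (a := PySem.Dict.empty) (b := PySem.Dict.empty)
      rw [hsplit]
      dsimp only
      have h2 := groups_fold_eq n2 k
      rw [← hlenI] at h2
      rw [groups_fold_eq n1 k, h2]
      by_cases hceq : pvCounterEq (n1.map (fun x => PySem.Int.mod x k)) (n2.map (fun y => PySem.Int.mod y k)) = true
      · have hlens := (counterEq_iff_lens n1 n2 k (PySem.List.pyRange 0 k) hallm).mp hceq
        rw [loopA_some _ _ _ _ _ (by
          intro m hm
          rw [hG_eq, hG_eq]
          exact hlens m hm)]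
        simp only [hceq, Bool.not_true, Bool.false_eq_true, if_false]
        have htot := alt_main n1 n2 k (PySem.List.pyRange 0 k) (pyRange_pairwise_lt _ _)
          hallm hbd hlens
        unfold pvEv at htot
        show PySem.Int.floordiv (0 + _) 2 = PySem.Int.floordiv (PySem.Int.floordiv _ k) 2
        rw [htot, zero_add]
        congr 1
        have hmap : (PySem.List.pyRange 0 k).map (fun m =>
            ((((pvSortVals (n1.foldl (fun d x => d.modify (PySem.Int.mod x k) [] (· ++ [x])) PySem.Dict.empty)).getD m []).zip
              ((pvSortVals (n2.foldl (fun d x => d.modify (PySem.Int.mod x k) [] (· ++ [x])) PySem.Dict.empty)).getD m [])).map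
                (fun p => PySem.Int.floordiv |p.1 - p.2| k)).sum)
            = (PySem.List.pyRange 0 k).map (fun m => PySem.Int.floordiv (pairCost (pvG n1 k m) (pvG n2 k m)) k) := by
          refine List.map_congr_left ?_
          intro m _
          rw [hG_eq, hG_eq, group_res_eq n1 n2 k m hk0]
        rw [hmap]
        have := sum_floordiv k hk0 ((PySem.List.pyRange 0 k).map (fun m => pairCost (pvG n1 k m) (pvG n2 k m)))
          (by
            intro d hd
            rcases List.mem_map.mp hd with ⟨m, _, rfl⟩
            exact dvd_pairCost n1 n2 k m)
        rw [List.map_map] at this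
        exact this
      · have hex : ∃ m ∈ PySem.List.pyRange 0 k,
            (pvG n1 k m).length ≠ (pvG n2 k m).length := by
          by_contra hno
          push_neg at hno
          exact hceq ((counterEq_iff_lens n1 n2 k (PySem.List.pyRange 0 k) hallm).mpr hno)
        rcases hex with ⟨m, hm, hne⟩
        rw [loopA_none _ _ _ _ _ ⟨m, hm, by rw [hG_eq, hG_eq]; exact hne⟩]
        have hc : pvCounterEq (n1.map (fun x => PySem.Int.mod x k)) (n2.map (fun y => PySem.Int.mod y k)) = false :=
          Bool.not_eq_true _ ▸ eq_false_of_ne_true hceq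
        simp only [hc, Bool.not_false, if_true]

theorem minOperations2_changed : Claim_changed_minOperations2 := by
  unfold Claim_changed_minOperations2; decide

theorem minOperations2_tight : Claim_exact_minOperations2 := by
  unfold Claim_exact_minOperations2
  intro n1 n2 k hdom hpre hd
  obtain ⟨hkneg, hsum, hnp⟩ := hd
  unfold Pre_minOperations2 at hpre
  have hk0 : k ≠ 0 := by omega
  have hbd : ∀ x ∈ n1 ++ n2, -2147483648 ≤ x ∧ x ≤ 2147483648 := by
    unfold Dom_minOperations2 at hdom
    simp only [Bool.and_eq_true, List.all_eq_true, pvDomInt, decide_eq_true_eq] at hdom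
    intro x hx
    rcases List.mem_append.mp hx with h | h
    · exact hdom.1.1 x h
    · exact hdom.1.2 x h
  have hlen : n1.length = n2.length := by
    rcases hpre with h | h | h
    · exact h
    · exact absurd hsum h
    · exact absurd h hk0
  have hr : PySem.List.pyRange 0 k = [] := by simp [PySem.List.pyRange]; omega
  have hA : minOperations2 n1 n2 k = 0 := by
    unfold minOperations2
    rw [if_neg (not_not_intro hsum), if_neg hk0]
    simp only [hr]
    show PySem.Int.floordiv 0 2 = 0
    decide
  rw [hA]
  unfold minOperations2_alt
  rw [if_neg (not_not_intro hsum), if_neg hk0]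
  by_cases hceq : pvCounterEq (n1.map (fun x => PySem.Int.mod x k)) (n2.map (fun y => PySem.Int.mod y k)) = true
  · have hallm : ∀ x ∈ n1 ++ n2, PySem.Int.mod x k ∈ PySem.List.pyRange (k + 1) 1 := by
      intro x _
      have := PySem.Int.mod_neg_bounds x hkneg
      exact PySem.List.mem_pyRange_one.mpr ⟨by omega, by omega⟩
    have hlens := (counterEq_iff_lens n1 n2 k (PySem.List.pyRange (k + 1) 1) hallm).mp hceq
    have hexm : ∃ m ∈ PySem.List.pyRange (k + 1) 1, pvG n1 k m ≠ pvG n2 k m := by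
      by_contra hno
      push_neg at hno
      apply hnp
      rw [List.perm_iff_count]
      intro a
      have hm : PySem.Int.mod a k ∈ PySem.List.pyRange (k + 1) 1 := by
        have := PySem.Int.mod_neg_bounds a hkneg
        exact PySem.List.mem_pyRange_one.mpr ⟨by omega, by omega⟩
      have hc1 : n1.count a = (pvG n1 k (PySem.Int.mod a k)).count a := by
        have h1 : (pvG n1 k (PySem.Int.mod a k)).count a
            = (n1.filter (fun x => PySem.Int.mod x k == PySem.Int.mod a k)).count a :=
          (PySem.List.sorted_perm _ _ _).count_eq a
        rw [h1, List.count_filter (by simp)]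
      have hc2 : n2.count a = (pvG n2 k (PySem.Int.mod a k)).count a := by
        have h1 : (pvG n2 k (PySem.Int.mod a k)).count a
            = (n2.filter (fun x => PySem.Int.mod x k == PySem.Int.mod a k)).count a :=
          (PySem.List.sorted_perm _ _ _).count_eq a
        rw [h1, List.count_filter (by simp)]
      rw [hc1, hc2, hno (PySem.Int.mod a k) hm]
    rcases hexm with ⟨m, hm, hnem⟩
    have hcost1 : 1 ≤ pairCost (pvG n1 k m) (pvG n2 k m) :=
      pairCost_pos _ _ (hlens m hm) hnem
    have htot := alt_main n1 n2 k (PySem.List.pyRange (k + 1) 1) (pyRange_pairwise_lt _ _)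
      hallm hbd hlens
    have htot1 : 1 ≤ ((PySem.List.sorted (pvEv n1 n2 k) evKey).foldl pvStep (0, 0, 0)).1 := by
      rw [htot]
      apply sum_ge_one (y := pairCost (pvG n1 k m) (pvG n2 k m))
      · intro x hx
        rcases List.mem_map.mp hx with ⟨q, _, rfl⟩
        exact pairCost_nonneg _ _
      · exact List.mem_map.mpr ⟨m, hm, rfl⟩
      · exact hcost1
    simp only [hceq, Bool.not_true, Bool.false_eq_true, if_false]
    show (0 : Int) ≠ PySem.Int.floordiv (PySem.Int.floordiv ((PySem.List.sorted (pvEv n1 n2 k) evKey).foldl pvStep (0, 0, 0)).1 k) 2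
    have hq1 : PySem.Int.floordiv ((PySem.List.sorted (pvEv n1 n2 k) evKey).foldl pvStep (0, 0, 0)).1 k ≤ -1 :=
      floordiv_le_neg_one _ k hkneg (by omega)
    have hq2 : PySem.Int.floordiv (PySem.Int.floordiv ((PySem.List.sorted (pvEv n1 n2 k) evKey).foldl pvStep (0, 0, 0)).1 k) 2 < 0 := by
      rw [PySem.Int.floordiv_lt_iff_lt_mul (by omega)]
      omega
    omega
  · have hc : pvCounterEq (n1.map (fun x => PySem.Int.mod x k)) (n2.map (fun y => PySem.Int.mod y k)) = false :=
      Bool.not_eq_true _ ▸ eq_false_of_ne_true hceq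
    simp only [hc, Bool.not_false, if_true]
    omega
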